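-- pv_equiv track=rewrite | github.com/eyorata/brownfield-cartographer | src/config.py | _looks_like_env_var_name
-- ===== SOURCE A (Python) =====
-- def _looks_like_env_var_name(value: str) -> bool:
--     s = (value or "").strip()
--     if not s:
--         return False
--     if len(s) > 120:
--         return False
--     if not ("A" <= s[0] <= "Z"):
--         return False
--     for ch in s:
--         if not (("A" <= ch <= "Z") or ("0" <= ch <= "9") or ch == "_"):
--             return False
--     return True
-- ===== SOURCE B (Python) =====
-- import re
--
-- _ENV_NAME_RE = re.compile(r"[A-Z][A-Z0-9_]*")
--
-- def _looks_like_env_var_name(value: str) -> bool: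
--     s = (value or "").strip()
--     if not s or len(s) > 120:
--         return False
--     return _ENV_NAME_RE.fullmatch(s) is not None
-- ===== Notes on version B (the rewrite author's own statement) =====
-- stated objective: idiomatic
-- what changed: Replaces the explicit first-character guard plus manual character-scan loop with a single anchored regex fullmatch([A-Z][A-Z0-9_]*) after the same strip/empty/length preamble.
import Mathlib
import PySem

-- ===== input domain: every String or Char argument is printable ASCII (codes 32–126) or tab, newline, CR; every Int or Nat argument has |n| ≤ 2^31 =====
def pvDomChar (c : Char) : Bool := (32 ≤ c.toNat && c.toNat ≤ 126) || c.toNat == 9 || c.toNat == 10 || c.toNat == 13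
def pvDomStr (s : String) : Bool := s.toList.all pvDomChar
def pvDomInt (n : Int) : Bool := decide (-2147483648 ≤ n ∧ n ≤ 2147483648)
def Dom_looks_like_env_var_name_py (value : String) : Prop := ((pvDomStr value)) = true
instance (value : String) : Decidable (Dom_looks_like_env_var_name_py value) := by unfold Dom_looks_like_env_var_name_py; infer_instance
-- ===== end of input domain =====

-- B replaces A's first-char guard + manual char loop with one anchored regex fullmatch (idiomatic).

-- ===== PORT A =====
-- guard + explicit scan, as in A's Python
def looks_like_env_var_name_py (value : String) : Bool :=
  let s := PySem.Str.strip value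
  if s = "" then false
  else if PySem.Str.len s > 120 then false
  else
    match PySem.Str.pyGet? s 0 with
    | none => false    -- unreachable: s nonempty
    | some c0 =>
      if !('A' ≤ c0 ∧ c0 ≤ 'Z') then false
      else s.toList.all (fun ch =>
        ('A' ≤ ch ∧ ch ≤ 'Z') || ('0' ≤ ch ∧ ch ≤ '9') || ch = '_')

-- ===== PORT B =====
-- re.fullmatch(r"[A-Z][A-Z0-9_]*", s): ported by the regex's meaning — head in [A-Z], tail in [A-Z0-9_]*
def envNameFullmatch (cs : List Char) : Bool :=
  match cs with
  | [] => false
  | c :: rest =>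
    ('A' ≤ c && c ≤ 'Z') &&
    rest.all (fun ch => ('A' ≤ ch && ch ≤ 'Z') || ('0' ≤ ch && ch ≤ '9') || ch == '_')

def looks_like_env_var_name_py_alt (value : String) : Bool :=
  let s := PySem.Str.strip value
  if s = "" ∨ PySem.Str.len s > 120 then false
  else envNameFullmatch s.toList

-- ===== PRECONDITION & SPEC =====
def Spec_looks_like_env_var_name_py (value : String) (out : Bool) : Prop := out = looks_like_env_var_name_py_alt value
instance (value : String) (out : Bool) : Decidable (Spec_looks_like_env_var_name_py value out) := by unfold Spec_looks_like_env_var_name_py; infer_instance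

-- ===== CLAIM (what is proved, stated in full; the proofs are below) =====
def Claim_equal_looks_like_env_var_name_py : Prop := ∀ (value : String), Dom_looks_like_env_var_name_py value → Spec_looks_like_env_var_name_py value (looks_like_env_var_name_py value)

-- ===== LEMMAS AND PROOFS =====
theorem env_core_eq (s : String) (hne : s ≠ "") :
    (match PySem.Str.pyGet? s 0 with
      | none => false
      | some c0 =>
        if !('A' ≤ c0 ∧ c0 ≤ 'Z') then false
        else s.toList.all (fun ch =>
          ('A' ≤ ch ∧ ch ≤ 'Z') || ('0' ≤ ch ∧ ch ≤ '9') || ch = '_'))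
    = envNameFullmatch s.toList := by
  have hl : s.toList ≠ [] := by
    intro h
    exact hne (by
      have h2 : s.toList = ("" : String).toList := by simpa using h
      exact String.toList_inj.mp h2)
  cases hcs : s.toList with
  | nil => exact absurd hcs hl
  | cons c rest =>
    have hget : PySem.Str.pyGet? s 0 = some c := by
      simp [PySem.Str.pyGet?, hcs]
    rw [hget]
    simp only [envNameFullmatch, List.all_cons]
    by_cases hA : 'A' ≤ c ∧ c ≤ 'Z'
    · have hb : ∀ ch : Char, (ch == '_') = decide (ch = '_') :=
        fun ch => Bool.beq_eq_decide_eq ch '_'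
      simp [hA, hb]
    · simp [hA]

theorem looks_eq (value : String) :
    looks_like_env_var_name_py value = looks_like_env_var_name_py_alt value := by
  unfold looks_like_env_var_name_py looks_like_env_var_name_py_alt
  generalize PySem.Str.strip value = s
  by_cases h0 : s = ""
  · rw [if_pos h0, if_pos (Or.inl h0)]
  · by_cases h1 : PySem.Str.len s > 120
    · rw [if_neg h0, if_pos h1, if_pos (Or.inr h1)]
    · rw [if_neg h0, if_neg h1, if_neg (by tauto : ¬(s = "" ∨ PySem.Str.len s > 120))]
      exact env_core_eq s h0

-- ===== VERDICT (by name: the statement is the Claim_ definition above) =====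
theorem looks_like_env_var_name_py_spec : Claim_equal_looks_like_env_var_name_py := by
  intro value _
  unfold Spec_looks_like_env_var_name_py
  exact looks_eq value
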